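-- pv_equiv track=rewrite | github.com/ali-a321/DNA_Toolkit | dna_toolkit.py | makeComplementDNARNA
-- ===== SOURCE A (Python) =====
-- def makeComplementDNARNA(seq):
--     dnaComp = ""
--     rnaSeq = ""
--     for nuc in seq:
--         if nuc == "A":
--             dnaComp += "T"
--             rnaSeq += "U"
--         elif nuc == "T":
--             dnaComp += "A"
--             rnaSeq += "A"
--         elif nuc == "G":
--             dnaComp += "C"
--             rnaSeq += "C"
--         elif nuc == "C":
--             dnaComp += "G"
--             rnaSeq += "G"
--     formatted_string = f"DNA String: 3' {dnaComp} 5', mRNA String: 3' {rnaSeq} 5'"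
--
--     return formatted_string
-- ===== SOURCE B (Python) =====
-- def makeComplementDNARNA(seq):
--     comp = {"A": "T", "T": "A", "G": "C", "C": "G"}
--     dnaComp = "".join(comp[n] for n in seq if n in comp)
--     rnaSeq = "".join("U" if c == "T" else c for c in dnaComp)
--     return f"DNA String: 3' {dnaComp} 5', mRNA String: 3' {rnaSeq} 5'"
-- ===== Notes on version B (the rewrite author's own statement) =====
-- stated objective: simpler
-- what changed: Replaces A's dual-accumulator character loop with a single dict-driven filtering join building only the DNA complement, then derives the mRNA string from it by mapping T to U.
import Mathlib
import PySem

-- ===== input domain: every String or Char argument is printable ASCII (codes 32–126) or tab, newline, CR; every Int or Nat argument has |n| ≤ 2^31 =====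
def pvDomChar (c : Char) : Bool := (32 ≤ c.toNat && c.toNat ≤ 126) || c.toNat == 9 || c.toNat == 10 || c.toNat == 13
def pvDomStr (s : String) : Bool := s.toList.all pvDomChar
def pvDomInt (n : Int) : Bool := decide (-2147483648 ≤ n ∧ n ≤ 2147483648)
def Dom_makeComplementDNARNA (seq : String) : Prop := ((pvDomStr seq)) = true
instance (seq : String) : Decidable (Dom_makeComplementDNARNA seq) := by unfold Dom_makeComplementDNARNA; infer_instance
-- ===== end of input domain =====

-- B builds only the DNA complement (dict + filtering join) and derives the mRNA string from it (T→U); simpler single accumulation.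

-- ===== PORT A =====
-- the for-loop over seq with its two growing string accumulators
def pvALoop : List Char → List Char → List Char → List Char × List Char
  | [], dnaComp, rnaSeq => (dnaComp, rnaSeq)
  | nuc :: rest, dnaComp, rnaSeq =>
    if nuc = 'A' then pvALoop rest (dnaComp ++ ['T']) (rnaSeq ++ ['U'])
    else if nuc = 'T' then pvALoop rest (dnaComp ++ ['A']) (rnaSeq ++ ['A'])
    else if nuc = 'G' then pvALoop rest (dnaComp ++ ['C']) (rnaSeq ++ ['C'])
    else if nuc = 'C' then pvALoop rest (dnaComp ++ ['G']) (rnaSeq ++ ['G'])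
    else pvALoop rest dnaComp rnaSeq

def makeComplementDNARNA (seq : String) : String :=
  let res := pvALoop seq.toList [] []
  String.ofList ("DNA String: 3' ".toList ++ res.1 ++ " 5', mRNA String: 3' ".toList ++ res.2 ++ " 5'".toList)

-- ===== PORT B =====
def pvComp : PySem.Dict Char Char := PySem.Dict.ofList [('A','T'), ('T','A'), ('G','C'), ('C','G')]

def makeComplementDNARNA_alt (seq : String) : String :=
  let dnaComp := seq.toList.filterMap (fun n => pvComp.get? n)
  let rnaSeq := dnaComp.map (fun c => if c = 'T' then 'U' else c)
  String.ofList ("DNA String: 3' ".toList ++ dnaComp ++ " 5', mRNA String: 3' ".toList ++ rnaSeq ++ " 5'".toList)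

-- ===== PRECONDITION & SPEC =====
def Spec_makeComplementDNARNA (seq : String) (out : String) : Prop := out = makeComplementDNARNA_alt seq
instance (seq : String) (out : String) : Decidable (Spec_makeComplementDNARNA seq out) := by unfold Spec_makeComplementDNARNA; infer_instance

-- ===== CLAIM (what is proved, stated in full; the proofs are below) =====
def Claim_equal_makeComplementDNARNA : Prop := ∀ (seq : String), Dom_makeComplementDNARNA seq → Spec_makeComplementDNARNA seq (makeComplementDNARNA seq)

-- ===== LEMMAS AND PROOFS =====

theorem pvComp_items : pvComp.items = [('A','T'), ('T','A'), ('G','C'), ('C','G')] := by decide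

-- loop invariant: A's loop appends exactly B's filterMap, and its RNA accumulator is the T→U image of the DNA one
theorem pvALoop_eq (l : List Char) : ∀ (d r : List Char),
    pvALoop l d r = (d ++ l.filterMap (fun n => pvComp.get? n),
                     r ++ (l.filterMap (fun n => pvComp.get? n)).map (fun c => if c = 'T' then 'U' else c)) := by
  induction l with
  | nil => intro d r; simp [pvALoop]
  | cons c rest ih =>
    intro d r
    by_cases hA : c = 'A'
    · subst hA; simp [pvALoop, ih, PySem.Dict.get?, pvComp_items, List.find?]
    · by_cases hT : c = 'T'
      · subst hT; simp [pvALoop, ih, PySem.Dict.get?, pvComp_items, List.find?]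
      · by_cases hG : c = 'G'
        · subst hG; simp [pvALoop, ih, PySem.Dict.get?, pvComp_items, List.find?]
        · by_cases hC : c = 'C'
          · subst hC; simp [pvALoop, ih, PySem.Dict.get?, pvComp_items, List.find?]
          · have h1 : ('A' == c) = false := by simp [Ne.symm hA]
            have h2 : ('T' == c) = false := by simp [Ne.symm hT]
            have h3 : ('G' == c) = false := by simp [Ne.symm hG]
            have h4 : ('C' == c) = false := by simp [Ne.symm hC]
            have hnone : pvComp.get? c = none := by
              simp [PySem.Dict.get?, pvComp_items, List.find?, h1, h2, h3, h4]
            simp [pvALoop, hA, hT, hG, hC, ih, hnone]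

-- ===== VERDICT (by name: the statement is the Claim_ definition above) =====
theorem makeComplementDNARNA_spec : Claim_equal_makeComplementDNARNA := by
  intro seq _
  unfold Spec_makeComplementDNARNA makeComplementDNARNA makeComplementDNARNA_alt
  simp [pvALoop_eq]
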